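-- pv_equiv track=rewrite | github.com/TitanSnow/ts-xmake-gui | argsToCommandLine.py | argsToCommandLine
-- ===== SOURCE A (Python) =====
-- def repeatText(text,count):
--     return text*count
--
-- def argsToCommandLine(args):
--     argv=args
--     result=''
--     for argIndex in range(len(argv)):
--         if argIndex>0:
--             result+=' '
--         arg=argv[argIndex]
--         quote=arg.find(' ')!=-1 or arg.find('\t')!=-1 or arg==''
--         if quote:
--             result+='\"'
--         bsCount=0
--         for p in arg:
--             if p=='\\':
--                 bsCount+=1
--             elif p=='"':
--                 result+=repeatText('\\',bsCount*2+1)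
--                 result+='"'
--                 bsCount=0
--             else:
--                 result+=repeatText('\\',bsCount)
--                 bsCount=0
--                 result+=p
--         if quote:
--             result+=repeatText('\\',bsCount*2)
--             result+='\"'
--         else:
--             result+=repeatText('\\',bsCount)
--     return result
-- ===== SOURCE B (Python) =====
-- def _fmtArg(arg):
--     need = ' ' in arg or '\t' in arg or arg == ''
--     pieces = []
--     i, n = 0, len(arg)
--     while i < n:
--         j = i
--         while j < n and arg[j] == '\\':
--             j += 1
--         k = j - i
--         if j == n:
--             # trailing run of backslashes: doubled only when the arg gets quoted
--             pieces.append('\\' * (2 * k if need else k))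
--             i = j
--         elif arg[j] == '"':
--             pieces.append('\\' * (2 * k + 1) + '"')
--             i = j + 1
--         else:
--             pieces.append('\\' * k + arg[j])
--             i = j + 1
--     body = ''.join(pieces)
--     return '"' + body + '"' if need else body
--
-- def argsToCommandLine(args):
--     return ' '.join(_fmtArg(a) for a in args)
-- ===== Notes on version B (the rewrite author's own statement) =====
-- stated objective: idiomatic
-- what changed: A threads one mutable result string and a pending-backslash counter through a char-by-char loop over all arguments; B formats each argument independently by scanning runs of backslashes (emitting each run with its following char in one step) and joins the per-argument strings with ' '.join.
import Mathlib
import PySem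

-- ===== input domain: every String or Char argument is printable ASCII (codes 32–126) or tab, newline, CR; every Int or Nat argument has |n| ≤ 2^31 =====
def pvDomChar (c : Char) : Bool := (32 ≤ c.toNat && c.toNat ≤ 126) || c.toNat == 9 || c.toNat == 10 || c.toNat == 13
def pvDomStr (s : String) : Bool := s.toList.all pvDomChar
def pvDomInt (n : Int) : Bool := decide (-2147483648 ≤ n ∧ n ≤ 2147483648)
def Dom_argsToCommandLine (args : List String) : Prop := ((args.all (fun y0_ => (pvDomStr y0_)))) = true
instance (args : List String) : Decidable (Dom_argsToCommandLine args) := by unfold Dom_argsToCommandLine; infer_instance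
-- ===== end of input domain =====

-- B replaces A's single stateful char-by-char loop (one pending-backslash counter
-- threaded through the whole result string) with a per-argument run-based scan
-- joined by ' '.join; same return value (objective: idiomatic).

-- ===== PORT A =====
-- helper repeatText(text, count) = text * count
def repeatTextA (text : List Char) (count : Int) : List Char := PySem.List.pyRepeat text count

-- body of A's inner 'for p in arg' loop; state = (result, bsCount)
def aStep (s : List Char × Int) (p : Char) : List Char × Int :=
  if p = '\\' then (s.1, s.2 + 1)
  else if p = '"' then (s.1 ++ repeatTextA ['\\'] (s.2 * 2 + 1) ++ ['"'], 0)
  else (s.1 ++ repeatTextA ['\\'] s.2 ++ [p], 0)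

-- body of A's outer 'for argIndex in range(len(argv))' loop
def aArgStep (args : List String) (result : List Char) (argIndex : Nat) : List Char :=
  let result := if argIndex > 0 then result ++ [' '] else result
  let arg := (args.getD argIndex "").toList
  let quote := (PySem.Chars.find arg [' '] ≠ -1 || PySem.Chars.find arg ['\t'] ≠ -1 || arg = [] : Bool)
  let result := if quote then result ++ ['"'] else result
  let s := arg.foldl aStep (result, 0)
  if quote then s.1 ++ repeatTextA ['\\'] (s.2 * 2) ++ ['"']
  else s.1 ++ repeatTextA ['\\'] s.2

def argsToCommandLine (args : List String) : String :=
  String.ofList ((List.range args.length).foldl (aArgStep args) [])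

-- ===== PORT B =====
-- one step per RUN of backslashes (B's outer while loop); need = arg will be quoted
def fmtCore (need : Bool) (cs : List Char) : List Char :=
  let k := (cs.takeWhile (· = '\\')).length
  match h : cs.drop k with
  | [] => List.replicate (if need then 2 * k else k) '\\'
  | c :: tl =>
      (if c = '"' then List.replicate (2 * k + 1) '\\' ++ ['"']
       else List.replicate k '\\' ++ [c]) ++ fmtCore need tl
termination_by cs.length
decreasing_by
  have hlen : (cs.drop k).length = cs.length - k := List.length_drop ..
  rw [h] at hlen
  simp at hlen
  omega

def fmtArg (arg : List Char) : List Char :=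
  let need := (PySem.Chars.isIn [' '] arg || PySem.Chars.isIn ['\t'] arg || arg = [] : Bool)
  let body := fmtCore need arg
  if need then '"' :: body ++ ['"'] else body

def argsToCommandLine_alt (args : List String) : String :=
  String.ofList (PySem.Chars.join [' '] (args.map (fun a => fmtArg a.toList)))

-- ===== PRECONDITION & SPEC =====
def Spec_argsToCommandLine (args : List String) (out : String) : Prop := out = argsToCommandLine_alt args
instance (args : List String) (out : String) : Decidable (Spec_argsToCommandLine args out) := by unfold Spec_argsToCommandLine; infer_instance

-- ===== CLAIM (what is proved, stated in full; the proofs are below) =====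
def Claim_equal_argsToCommandLine : Prop := ∀ (args : List String), Dom_argsToCommandLine args → Spec_argsToCommandLine args (argsToCommandLine args)

-- ===== LEMMAS AND PROOFS =====

-- A's two 'if quote' finalisations of the inner loop, as one function of need
def finA (need : Bool) (s : List Char × Int) : List Char :=
  s.1 ++ repeatTextA ['\\'] (if need then s.2 * 2 else s.2) ++ (if need then ['"'] else [])

theorem takeWhile_replicate_bs (k : Nat) (rest : List Char) (h : ∀ c ∈ rest.head?, c ≠ '\\') :
    ((List.replicate k '\\' ++ rest).takeWhile (· = '\\')) = List.replicate k '\\' := by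
  induction k with
  | zero =>
    cases rest with
    | nil => simp
    | cons c tl => simp_all
  | succ n ih => simpa [List.replicate_succ, List.takeWhile_cons] using ih

theorem fmtCore_bs (need : Bool) (k : Nat) :
    fmtCore need (List.replicate k '\\') = List.replicate (if need then 2 * k else k) '\\' := by
  rw [fmtCore]
  have h1 : ((List.replicate k '\\').takeWhile (· = '\\')) = List.replicate k '\\' := by simp
  rw [h1, List.length_replicate]
  have h2 : (List.replicate k '\\').drop k = ([] : List Char) := by simp
  split
  · rfl
  · rename_i c tl heq
    rw [h2] at heq
    exact absurd heq (by simp)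

theorem fmtCore_run (need : Bool) (k : Nat) (c : Char) (tl : List Char) (hc : c ≠ '\\') :
    fmtCore need (List.replicate k '\\' ++ c :: tl) =
      (if c = '"' then List.replicate (2 * k + 1) '\\' ++ ['"']
       else List.replicate k '\\' ++ [c]) ++ fmtCore need tl := by
  rw [fmtCore]
  have h1 := takeWhile_replicate_bs k (c :: tl) (fun d hd => by simp at hd; exact hd ▸ hc)
  rw [h1, List.length_replicate]
  have h2 : (List.replicate k '\\' ++ c :: tl).drop k = c :: tl := by
    exact List.drop_left' (by simp)
  split
  · rename_i heq
    rw [h2] at heq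
    exact absurd heq (by simp)
  · rename_i c1 tl1 heq
    rw [h2] at heq
    cases heq
    rfl

theorem repeatTextA_bs (n : Nat) (m : Int) (hm : m = (n : Int)) :
    repeatTextA ['\\'] m = List.replicate n '\\' := by
  rw [repeatTextA, PySem.List.pyRepeat_singleton]
  congr 1
  omega

theorem innerLoop (need : Bool) (cs : List Char) : ∀ (k : Nat) (r : List Char),
    finA need (cs.foldl aStep (r, (k : Int))) =
      r ++ fmtCore need (List.replicate k '\\' ++ cs) ++ (if need then ['"'] else []) := by
  induction cs with
  | nil =>
    intro k r
    rw [List.foldl_nil, List.append_nil, fmtCore_bs]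
    cases need with
    | false => simp [finA, repeatTextA_bs k (k : Int) rfl]
    | true => simp [finA, repeatTextA_bs (2 * k) ((k : Int) * 2) (by push_cast; ring)]
  | cons c tl ih =>
    intro k r
    by_cases hbs : c = '\\'
    · subst hbs
      have hstep : aStep (r, (k : Int)) '\\' = (r, ((k + 1 : Nat) : Int)) := by
        simp [aStep]
      rw [List.foldl_cons, hstep, ih (k + 1) r]
      congr 2
      rw [List.replicate_succ']
      simp
    · by_cases hq : c = '"'
      · subst hq
        have hstep : aStep (r, (k : Int)) '"' =
            (r ++ List.replicate (2 * k + 1) '\\' ++ ['"'], ((0 : Nat) : Int)) := by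
          simp [aStep, repeatTextA_bs (2 * k + 1) ((k : Int) * 2 + 1) (by push_cast; ring)]
        rw [List.foldl_cons, hstep, ih 0 _, fmtCore_run need k '"' tl hbs]
        simp
      · have hstep : aStep (r, (k : Int)) c =
            (r ++ List.replicate k '\\' ++ [c], ((0 : Nat) : Int)) := by
          simp [aStep, hbs, hq, repeatTextA_bs k (k : Int) rfl]
        rw [List.foldl_cons, hstep, ih 0 _, fmtCore_run need k c tl hbs]
        simp [hq]

theorem find_eq_isIn (arg sub : List Char) :
    decide (PySem.Chars.find arg sub ≠ -1) = PySem.Chars.isIn sub arg := by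
  cases hb : PySem.Chars.isIn sub arg
  · rw [PySem.Chars.isIn_eq_false_iff] at hb
    simp [PySem.Chars.find_eq_neg_one_iff, hb]
  · simp [(PySem.Chars.find_ne_neg_one_iff arg sub).mpr ((PySem.Chars.isIn_iff_infix sub arg).mp hb)]

theorem perArg (args : List String) (result : List Char) (argIndex : Nat) :
    aArgStep args result argIndex =
      (if argIndex > 0 then result ++ [' '] else result) ++ fmtArg (args.getD argIndex "").toList := by
  simp only [aArgStep, fmtArg, find_eq_isIn]
  cases hn : (PySem.Chars.isIn [' '] (args.getD argIndex "").toList ||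
      PySem.Chars.isIn ['\t'] (args.getD argIndex "").toList ||
      decide ((args.getD argIndex "").toList = [])) with
  | false =>
    have h := innerLoop false (args.getD argIndex "").toList 0
      (if argIndex > 0 then result ++ [' '] else result)
    simp [finA] at h
    simpa using h
  | true =>
    have h := innerLoop true (args.getD argIndex "").toList 0
      ((if argIndex > 0 then result ++ [' '] else result) ++ ['"'])
    simp [finA] at h
    simpa [List.append_assoc] using h

theorem join_concat (l : List (List Char)) (y : List Char) :
    PySem.Chars.join [' '] (l ++ [y]) =
      PySem.Chars.join [' '] l ++ (if l = [] then [] else [' ']) ++ y := by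
  induction l with
  | nil => simp [PySem.Chars.join_nil, PySem.Chars.join_singleton]
  | cons a l' ih =>
    cases l' with
    | nil => simp [PySem.Chars.join_singleton, PySem.Chars.join_cons_cons]
    | cons b l'' =>
      simp only [List.cons_append, PySem.Chars.join_cons_cons]
      rw [List.cons_append] at ih
      rw [ih]
      simp [List.append_assoc]

theorem outer (args : List String) :
    (List.range args.length).foldl (aArgStep args) [] =
      PySem.Chars.join [' '] (args.map (fun a => fmtArg a.toList)) := by
  induction args using List.reverseRecOn with
  | nil => simp [PySem.Chars.join_nil]
  | append_singleton xs x ih =>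
    have hcongr : (List.range xs.length).foldl (aArgStep (xs ++ [x])) [] =
        (List.range xs.length).foldl (aArgStep xs) [] := by
      apply PySem.List.foldl_congr_mem
      intro acc i hi
      rw [perArg, perArg, List.getD_append _ _ _ _ (List.mem_range.mp hi)]
    have hx : ((xs ++ [x]).getD xs.length "") = x := by
      simp [List.getD]
    rw [List.length_append, List.length_singleton, List.range_succ, List.foldl_append,
        List.foldl_cons, List.foldl_nil, hcongr, ih, perArg, hx,
        List.map_append, List.map_singleton, join_concat]
    cases xs <;> simp

-- ===== VERDICT (by name: the statement is the Claim_ definition above) =====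
theorem argsToCommandLine_spec : Claim_equal_argsToCommandLine := by
  intro args _
  unfold Spec_argsToCommandLine argsToCommandLine argsToCommandLine_alt
  rw [outer]
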